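-- pv_equiv track=rewrite | github.com/Cautioncrazy/Pokemon-RogueExtract | tools/pbs_generator/generate_pokemon_index.py | find_chain_roots
-- ===== SOURCE A (Python) =====
-- from collections import defaultdict, deque
--
-- def find_chain_roots(species_id, reverse):
--     visited = set()
--     q = deque([species_id])
--     roots = set()
--
--     while q:
--         cur = q.popleft()
--         if cur in visited:
--             continue
--         visited.add(cur)
--
--         parents = reverse.get(cur, [])
--         if not parents:
--             roots.add(cur)
--         else:
--             for p in parents:
--                 q.append(p)
--
--     if not roots:
--         roots.add(species_id)
--     return sorted(roots)
-- ===== SOURCE B (Python) =====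
-- def find_chain_roots(species_id, reverse):
--     # Saturate the reachable-ancestor set level by level until it stops growing,
--     # then pick out the nodes with no parents.
--     reach = {species_id}
--     while True:
--         nxt = reach | {p for x in reach for p in reverse.get(x, [])}
--         if nxt == reach:
--             break
--         reach = nxt
--     roots = sorted(x for x in reach if not reverse.get(x, []))
--     return roots if roots else [species_id]
-- ===== Notes on version B (the rewrite author's own statement) =====
-- stated objective: alternative
-- what changed: Replaces A's one-node-at-a-time BFS (FIFO queue + visited set) by round-based fixpoint saturation: repeatedly union the reach set with all parents of its members until it stops growing, then filter out the parentless members and sort.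
import Mathlib
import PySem

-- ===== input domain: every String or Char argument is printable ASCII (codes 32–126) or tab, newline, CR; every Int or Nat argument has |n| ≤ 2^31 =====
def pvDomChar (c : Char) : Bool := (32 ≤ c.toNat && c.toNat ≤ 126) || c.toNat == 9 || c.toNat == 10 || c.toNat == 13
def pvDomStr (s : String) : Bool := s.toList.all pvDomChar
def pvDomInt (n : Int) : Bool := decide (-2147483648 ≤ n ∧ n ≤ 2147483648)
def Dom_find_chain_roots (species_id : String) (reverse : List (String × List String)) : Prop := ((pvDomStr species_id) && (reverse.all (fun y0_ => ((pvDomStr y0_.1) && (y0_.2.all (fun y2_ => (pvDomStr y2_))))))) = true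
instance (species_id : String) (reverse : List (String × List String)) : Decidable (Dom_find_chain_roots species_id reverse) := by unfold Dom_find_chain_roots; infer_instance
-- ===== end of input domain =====

-- B replaces A's visited-set BFS over an explicit queue by round-based saturation of the
-- reachable-ancestor set to a fixpoint (objective: alternative, same result, no speed claim).

-- ===== PORT A =====
-- reverse.get(cur, []) (shared lookup helper)
def fcrPar (reverse : List (String × List String)) (x : String) : List String :=
  (PySem.Dict.mk reverse).getD x []

-- the while-q loop; fuel bounds the number of pops (1 + total parent-list length suffices)
def fcrLoopA (reverse : List (String × List String)) :
    Nat → List String → PySem.Set String → PySem.Set String → PySem.Set String × PySem.Set String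
  | 0, _, visited, roots => (visited, roots)
  | _ + 1, [], visited, roots => (visited, roots)
  | fuel + 1, cur :: q', visited, roots =>
    if PySem.Set.contains visited cur then
      fcrLoopA reverse fuel q' visited roots
    else
      let visited' := PySem.Set.add visited cur
      let ps := fcrPar reverse cur
      if ps.isEmpty then
        fcrLoopA reverse fuel q' visited' (PySem.Set.add roots cur)
      else
        fcrLoopA reverse fuel (q' ++ ps) visited' roots

def find_chain_roots (species_id : String) (reverse : List (String × List String)) : List String :=
  let fuel := 1 + (reverse.map (fun kv => kv.2.length)).sum
  let res := fcrLoopA reverse fuel [species_id] PySem.Set.empty PySem.Set.empty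
  let roots := if res.2.isEmpty then PySem.Set.add res.2 species_id else res.2
  PySem.List.sorted roots (fun x => x) false

-- ===== PORT B =====
-- one saturation round: reach | {p for x in reach for p in reverse.get(x, [])}
def fcrStep (reverse : List (String × List String)) (reach : PySem.Set String) : PySem.Set String :=
  PySem.Set.union reach (reach.flatMap (fun x => fcrPar reverse x))

-- while True: grow reach; stop at the fixpoint (fuel bounds rounds: |universe| suffices)
def fcrLoopB (reverse : List (String × List String)) : Nat → PySem.Set String → PySem.Set String
  | 0, reach => reach
  | fuel + 1, reach =>
    let nxt := fcrStep reverse reach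
    if PySem.Set.equal nxt reach then reach else fcrLoopB reverse fuel nxt

def find_chain_roots_alt (species_id : String) (reverse : List (String × List String)) : List String :=
  let fuel := (species_id :: reverse.flatMap (fun kv => kv.2)).dedup.length
  let reach := fcrLoopB reverse fuel [species_id]
  let roots := PySem.List.sorted (reach.filter (fun x => (fcrPar reverse x).isEmpty)) (fun x => x) false
  if roots.isEmpty then [species_id] else roots

-- ===== PRECONDITION & SPEC =====
def Spec_find_chain_roots (species_id : String) (reverse : List (String × List String)) (out : List String) : Prop := out = find_chain_roots_alt species_id reverse
instance (species_id : String) (reverse : List (String × List String)) (out : List String) : Decidable (Spec_find_chain_roots species_id reverse out) := by unfold Spec_find_chain_roots; infer_instance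

-- ===== CLAIM (what is proved, stated in full; the proofs are below) =====
def Claim_equal_find_chain_roots : Prop := ∀ (species_id : String) (reverse : List (String × List String)), Dom_find_chain_roots species_id reverse → Spec_find_chain_roots species_id reverse (find_chain_roots species_id reverse)

-- ===== LEMMAS AND PROOFS =====

-- ancestors reachable from s along parent edges
inductive FcrReach (reverse : List (String × List String)) (s : String) : String → Prop
  | refl : FcrReach reverse s s
  | step {x p : String} : FcrReach reverse s x → p ∈ fcrPar reverse x → FcrReach reverse s p

lemma fcrPar_nil (x : String) : fcrPar [] x = [] := rfl

lemma fcrPar_cons (k : String) (vs : List String) (rest : List (String × List String)) (x : String) :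
    fcrPar ((k, vs) :: rest) x = if k == x then vs else fcrPar rest x := by
  simp only [fcrPar, PySem.Dict.getD_eq_get?_getD, PySem.Dict.get?_mk_cons]
  split <;> rfl

lemma fcrPar_subset (reverse : List (String × List String)) (x p : String)
    (hp : p ∈ fcrPar reverse x) : p ∈ reverse.flatMap (fun kv => kv.2) := by
  induction reverse with
  | nil => simp [fcrPar_nil] at hp
  | cons kv rest ih =>
    obtain ⟨k, vs⟩ := kv
    rw [fcrPar_cons] at hp
    by_cases h : (k == x) = true
    · simp [h] at hp; simp [List.mem_flatMap]; exact Or.inl hp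
    · simp [h] at hp; simp [List.mem_flatMap]
      rcases List.mem_flatMap.mp (ih hp) with ⟨kv', hkv', hmem⟩
      exact Or.inr ⟨kv'.1, kv'.2, hkv', hmem⟩

-- potential: total parent-list length over the not-yet-visited keys
def fcrPhi (reverse : List (String × List String)) (visited : List String) : Nat :=
  ((reverse.filter (fun kv => !(PySem.Set.contains visited kv.1))).map (fun kv => kv.2.length)).sum

lemma fcrPhi_cons (k : String) (vs : List String) (rest : List (String × List String)) (visited : List String) :
    fcrPhi ((k, vs) :: rest) visited
      = (if k ∈ visited then 0 else vs.length) + fcrPhi rest visited := by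
  simp only [fcrPhi, List.filter_cons]
  by_cases h : k ∈ visited <;> simp [h, PySem.Set.contains]

lemma fcrPhi_le_sum (reverse : List (String × List String)) (visited : List String) :
    fcrPhi reverse visited ≤ (reverse.map (fun kv => kv.2.length)).sum := by
  induction reverse with
  | nil => simp [fcrPhi]
  | cons kv rest ih =>
    obtain ⟨k, vs⟩ := kv
    rw [fcrPhi_cons]
    simp only [List.map_cons, List.sum_cons]
    split <;> omega

lemma fcrPhi_mono (reverse : List (String × List String)) (visited : List String) (cur : String) :
    fcrPhi reverse (PySem.Set.add visited cur) ≤ fcrPhi reverse visited := by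
  induction reverse with
  | nil => simp [fcrPhi]
  | cons kv rest ih =>
    obtain ⟨k, vs⟩ := kv
    rw [fcrPhi_cons, fcrPhi_cons]
    by_cases h : k ∈ visited
    · have h' : k ∈ PySem.Set.add visited cur := (PySem.Set.mem_add visited cur k).mpr (Or.inl h)
      rw [if_pos h, if_pos h']; omega
    · split <;> omega

lemma fcrPhi_add (reverse : List (String × List String)) (visited : List String) (cur : String)
    (hcur : cur ∉ visited) :
    fcrPhi reverse (PySem.Set.add visited cur) + (fcrPar reverse cur).length ≤ fcrPhi reverse visited := by
  induction reverse with
  | nil => simp [fcrPhi, fcrPar_nil]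
  | cons kv rest ih =>
    obtain ⟨k, vs⟩ := kv
    rw [fcrPhi_cons, fcrPhi_cons, fcrPar_cons]
    by_cases hk : (k == cur) = true
    · have hkc : k = cur := by simpa using hk
      have h1 : k ∉ visited := by rw [hkc]; exact hcur
      have h2 : k ∈ PySem.Set.add visited cur := (PySem.Set.mem_add visited cur k).mpr (Or.inr hkc)
      rw [if_pos hk, if_pos h2, if_neg h1]
      have := fcrPhi_mono rest visited cur
      omega
    · have hkc : k ≠ cur := by simpa using hk
      rw [if_neg hk]
      by_cases hv2 : k ∈ visited
      · have h2 : k ∈ PySem.Set.add visited cur := (PySem.Set.mem_add visited cur k).mpr (Or.inl hv2)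
        rw [if_pos h2, if_pos hv2]
        omega
      · have h2 : k ∉ PySem.Set.add visited cur := fun h =>
          (((PySem.Set.mem_add visited cur k).mp h).elim hv2 hkc)
        rw [if_neg h2, if_neg hv2]
        omega

-- the BFS loop's full invariant package
lemma fcrLoopA_spec (reverse : List (String × List String)) (sid : String) :
    ∀ (fuel : Nat) (q visited roots : List String),
    q.length + fcrPhi reverse visited ≤ fuel →
    (∀ x ∈ q, FcrReach reverse sid x) →
    (∀ x ∈ visited, FcrReach reverse sid x) →
    visited.Nodup → roots.Nodup →
    (∀ x ∈ q, x ∈ (fcrLoopA reverse fuel q visited roots).1) ∧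
    (∀ x ∈ visited, x ∈ (fcrLoopA reverse fuel q visited roots).1) ∧
    (∀ x ∈ (fcrLoopA reverse fuel q visited roots).1, x ∉ visited →
        ∀ p ∈ fcrPar reverse x, p ∈ (fcrLoopA reverse fuel q visited roots).1) ∧
    (∀ x, x ∈ (fcrLoopA reverse fuel q visited roots).2 ↔
        x ∈ roots ∨ (x ∈ (fcrLoopA reverse fuel q visited roots).1 ∧ x ∉ visited ∧ fcrPar reverse x = [])) ∧
    (∀ x ∈ (fcrLoopA reverse fuel q visited roots).1, FcrReach reverse sid x) ∧
    (fcrLoopA reverse fuel q visited roots).2.Nodup := by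
  intro fuel
  induction fuel with
  | zero =>
    intro q visited roots hfuel hq hv hnv hnr
    have hq0 : q = [] := by
      have := Nat.le_zero.mp hfuel
      exact List.eq_nil_of_length_eq_zero (by omega)
    subst hq0
    simp only [fcrLoopA]
    refine ⟨by simp, fun x hx => hx, fun x hx hnx => absurd hx hnx, ?_, hv, hnr⟩
    intro x
    constructor
    · intro h; exact Or.inl h
    · rintro (h | ⟨hx, hnx, _⟩); exact h; exact absurd hx hnx
  | succ fuel ih =>
    intro q visited roots hfuel hq hv hnv hnr
    match q with
    | [] =>
      simp only [fcrLoopA]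
      refine ⟨by simp, fun x hx => hx, fun x hx hnx => absurd hx hnx, ?_, hv, hnr⟩
      intro x
      constructor
      · intro h; exact Or.inl h
      · rintro (h | ⟨hx, hnx, _⟩); exact h; exact absurd hx hnx
    | cur :: q' =>
      simp only [fcrLoopA]
      by_cases hc : (PySem.Set.contains visited cur) = true
      · -- cur already visited: skip
        have hcm : cur ∈ visited := (PySem.Set.contains_iff visited cur).mp hc
        simp only [hc, if_true]
        have hfuel' : q'.length + fcrPhi reverse visited ≤ fuel := by
          simp only [List.length_cons] at hfuel; omega
        obtain ⟨c1, c2, c3, r1, snd, nr⟩ :=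
          ih q' visited roots hfuel' (fun x hx => hq x (List.mem_cons_of_mem _ hx)) hv hnv hnr
        refine ⟨?_, c2, c3, r1, snd, nr⟩
        intro x hx
        rcases List.mem_cons.mp hx with h | h
        · exact c2 x (h ▸ hcm)
        · exact c1 x h
      · have hcm : cur ∉ visited := fun h => hc ((PySem.Set.contains_iff visited cur).mpr h)
        simp only [hc, if_false, Bool.false_eq_true]
        have hcurR : FcrReach reverse sid cur := hq cur List.mem_cons_self
        have hv' : ∀ x ∈ PySem.Set.add visited cur, FcrReach reverse sid x := by
          intro x hx
          rcases (PySem.Set.mem_add visited cur x).mp hx with h | h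
          · exact hv x h
          · exact h ▸ hcurR
        have hnv' : (PySem.Set.add visited cur).Nodup := PySem.Set.nodup_add _ _ hnv
        have hmemadd : ∀ x, x ∈ PySem.Set.add visited cur ↔ x ∈ visited ∨ x = cur :=
          fun x => PySem.Set.mem_add visited cur x
        by_cases hps : (fcrPar reverse cur).isEmpty = true
        · -- no parents: cur is a root
          have hpse : fcrPar reverse cur = [] := List.isEmpty_iff.mp hps
          simp only [hps, if_true]
          have hfuel' : q'.length + fcrPhi reverse (PySem.Set.add visited cur) ≤ fuel := by
            have := fcrPhi_mono reverse visited cur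
            simp only [List.length_cons] at hfuel; omega
          obtain ⟨c1, c2, c3, r1, snd, nr⟩ :=
            ih q' (PySem.Set.add visited cur) (PySem.Set.add roots cur) hfuel'
              (fun x hx => hq x (List.mem_cons_of_mem _ hx)) hv' hnv' (PySem.Set.nodup_add _ _ hnr)
          have hcurV : cur ∈ (fcrLoopA reverse fuel q' (PySem.Set.add visited cur) (PySem.Set.add roots cur)).1 :=
            c2 cur ((hmemadd cur).mpr (Or.inr rfl))
          refine ⟨?_, ?_, ?_, ?_, snd, nr⟩
          · intro x hx
            rcases List.mem_cons.mp hx with h | h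
            · exact h ▸ hcurV
            · exact c1 x h
          · intro x hx; exact c2 x ((hmemadd x).mpr (Or.inl hx))
          · intro x hx hnx p hp
            by_cases hxc : x = cur
            · rw [hxc, hpse] at hp; exact absurd hp (List.not_mem_nil)
            · exact c3 x hx (fun h => (((hmemadd x).mp h).elim hnx hxc)) p hp
          · intro x
            rw [r1 x, PySem.Set.mem_add roots cur x]
            constructor
            · rintro ((h | h) | ⟨hx, hnx, hpx⟩)
              · exact Or.inl h
              · exact Or.inr ⟨h ▸ hcurV, h ▸ hcm, h ▸ hpse⟩
              · exact Or.inr ⟨hx, fun h => hnx ((hmemadd x).mpr (Or.inl h)), hpx⟩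
            · rintro (h | ⟨hx, hnx, hpx⟩)
              · exact Or.inl (Or.inl h)
              · by_cases hxc : x = cur
                · exact Or.inl (Or.inr hxc)
                · exact Or.inr ⟨hx, fun h => (((hmemadd x).mp h).elim hnx hxc), hpx⟩
        · -- parents: push them
          have hpsne : fcrPar reverse cur ≠ [] := fun h => by
            rw [h] at hps; exact hps rfl
          simp only [hps, if_false, Bool.false_eq_true]
          have hfuel' : (q' ++ fcrPar reverse cur).length + fcrPhi reverse (PySem.Set.add visited cur) ≤ fuel := by
            have := fcrPhi_add reverse visited cur hcm
            simp only [List.length_append, List.length_cons] at hfuel ⊢; omega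
          have hq' : ∀ x ∈ q' ++ fcrPar reverse cur, FcrReach reverse sid x := by
            intro x hx
            rcases List.mem_append.mp hx with h | h
            · exact hq x (List.mem_cons_of_mem _ h)
            · exact FcrReach.step hcurR h
          obtain ⟨c1, c2, c3, r1, snd, nr⟩ :=
            ih (q' ++ fcrPar reverse cur) (PySem.Set.add visited cur) roots hfuel' hq' hv' hnv' hnr
          have hcurV : cur ∈ (fcrLoopA reverse fuel (q' ++ fcrPar reverse cur) (PySem.Set.add visited cur) roots).1 :=
            c2 cur ((hmemadd cur).mpr (Or.inr rfl))
          refine ⟨?_, ?_, ?_, ?_, snd, nr⟩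
          · intro x hx
            rcases List.mem_cons.mp hx with h | h
            · exact h ▸ hcurV
            · exact c1 x (List.mem_append_left _ h)
          · intro x hx; exact c2 x ((hmemadd x).mpr (Or.inl hx))
          · intro x hx hnx p hp
            by_cases hxc : x = cur
            · exact c1 p (List.mem_append_right _ (hxc ▸ hp))
            · exact c3 x hx (fun h => (((hmemadd x).mp h).elim hnx hxc)) p hp
          · intro x
            rw [r1 x]
            constructor
            · rintro (h | ⟨hx, hnx, hpx⟩)
              · exact Or.inl h
              · exact Or.inr ⟨hx, fun h => hnx ((hmemadd x).mpr (Or.inl h)), hpx⟩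
            · rintro (h | ⟨hx, hnx, hpx⟩)
              · exact Or.inl h
              · by_cases hxc : x = cur
                · exact absurd (hxc ▸ hpx) hpsne
                · exact Or.inr ⟨hx, fun h => (((hmemadd x).mp h).elim hnx hxc), hpx⟩

-- characterisation of A's roots set: exactly the reachable nodes with no parents
lemma fcrA_roots_char (species_id : String) (reverse : List (String × List String)) :
    (∀ x, x ∈ (fcrLoopA reverse (1 + (reverse.map (fun kv => kv.2.length)).sum)
          [species_id] ([] : List String) ([] : List String)).2 ↔
        (FcrReach reverse species_id x ∧ fcrPar reverse x = [])) ∧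
    (fcrLoopA reverse (1 + (reverse.map (fun kv => kv.2.length)).sum)
          [species_id] ([] : List String) ([] : List String)).2.Nodup := by
  have hfuel : [species_id].length + fcrPhi reverse ([] : List String)
      ≤ 1 + (reverse.map (fun kv => kv.2.length)).sum := by
    have := fcrPhi_le_sum reverse ([] : List String)
    simp only [List.length_cons, List.length_nil]; omega
  obtain ⟨c1, _, c3, r1, snd, nr⟩ :=
    fcrLoopA_spec reverse species_id _ [species_id] ([] : List String) ([] : List String) hfuel
      (by rintro x hx; rw [List.mem_singleton.mp hx]; exact FcrReach.refl)
      (by intro x hx; exact absurd hx (List.not_mem_nil))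
      List.nodup_nil List.nodup_nil
  set V := (fcrLoopA reverse (1 + (reverse.map (fun kv => kv.2.length)).sum)
      [species_id] ([] : List String) ([] : List String)).1 with hV
  have hcomplete : ∀ x, FcrReach reverse species_id x → x ∈ V := by
    intro x hx
    induction hx with
    | refl => exact c1 species_id List.mem_cons_self
    | step hr hp ihr => exact c3 _ ihr (List.not_mem_nil) _ hp
  refine ⟨?_, nr⟩
  intro x
  rw [r1 x]
  constructor
  · rintro (h | ⟨hx, _, hpx⟩)
    · exact absurd h (List.not_mem_nil)
    · exact ⟨snd x hx, hpx⟩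
  · rintro ⟨hr, hpx⟩
    exact Or.inr ⟨hcomplete x hr, List.not_mem_nil, hpx⟩

-- the saturation loop's invariant package
lemma fcrLoopB_spec (species_id : String) (reverse : List (String × List String)) :
    ∀ (fuel : Nat) (reach : List String),
    reach.Nodup →
    (∀ x ∈ reach, x ∈ species_id :: reverse.flatMap (fun kv => kv.2)) →
    (∀ x ∈ reach, FcrReach reverse species_id x) →
    species_id ∈ reach →
    (species_id :: reverse.flatMap (fun kv => kv.2)).dedup.length + 1 ≤ fuel + reach.length →
    (∀ x, x ∈ fcrLoopB reverse fuel reach ↔ FcrReach reverse species_id x) ∧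
    (fcrLoopB reverse fuel reach).Nodup := by
  intro fuel
  induction fuel with
  | zero =>
    intro reach hnd hsub _ _ hfuel
    exfalso
    have hlen : reach.length ≤ (species_id :: reverse.flatMap (fun kv => kv.2)).dedup.length := by
      have h1 : reach.length = reach.toFinset.card := (List.toFinset_card_of_nodup hnd).symm
      have h2 : (species_id :: reverse.flatMap (fun kv => kv.2)).dedup.length
          = (species_id :: reverse.flatMap (fun kv => kv.2)).toFinset.card :=
        (List.card_toFinset _).symm
      rw [h1, h2]
      apply Finset.card_le_card
      intro a ha
      rw [List.mem_toFinset] at ha ⊢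
      exact hsub a ha
    omega
  | succ fuel ih =>
    intro reach hnd hsub hsound hsid hfuel
    simp only [fcrLoopB]
    by_cases heq : (PySem.Set.equal (fcrStep reverse reach) reach) = true
    · -- fixpoint: reach is closed, hence exactly the reachable set
      simp only [heq, if_true]
      have hmem := (PySem.Set.equal_iff _ _).mp heq
      have hclosed : ∀ x ∈ reach, ∀ p ∈ fcrPar reverse x, p ∈ reach := by
        intro x hx p hp
        apply (hmem p).mp
        unfold fcrStep
        rw [PySem.Set.mem_union reach _ p]
        exact Or.inr (List.mem_flatMap.mpr ⟨x, hx, hp⟩)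
      refine ⟨?_, hnd⟩
      intro x
      constructor
      · exact hsound x
      · intro hr
        induction hr with
        | refl => exact hsid
        | step hr hp ihr => exact hclosed _ ihr _ hp
    · -- grow and recurse
      simp only [heq, if_false, Bool.false_eq_true]
      have hndn : (fcrStep reverse reach).Nodup := PySem.Set.nodup_union _ _ hnd
      have hsubset : ∀ x ∈ reach, x ∈ fcrStep reverse reach := by
        intro x hx; unfold fcrStep; rw [PySem.Set.mem_union reach _ x]; exact Or.inl hx
      have hsubn : ∀ x ∈ fcrStep reverse reach, x ∈ species_id :: reverse.flatMap (fun kv => kv.2) := by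
        intro x hx
        unfold fcrStep at hx
        rcases (PySem.Set.mem_union reach _ x).mp hx with h | h
        · exact hsub x h
        · rcases List.mem_flatMap.mp h with ⟨y, _, hp⟩
          exact List.mem_cons_of_mem _ (fcrPar_subset reverse y x hp)
      have hsoundn : ∀ x ∈ fcrStep reverse reach, FcrReach reverse species_id x := by
        intro x hx
        unfold fcrStep at hx
        rcases (PySem.Set.mem_union reach _ x).mp hx with h | h
        · exact hsound x h
        · rcases List.mem_flatMap.mp h with ⟨y, hy, hp⟩
          exact FcrReach.step (hsound y hy) hp
      have hgrow : reach.length < (fcrStep reverse reach).length := by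
        have hne : ¬ ∀ x, x ∈ fcrStep reverse reach ↔ x ∈ reach := fun h =>
          heq ((PySem.Set.equal_iff _ _).mpr h)
        push_neg at hne
        obtain ⟨y, hy⟩ := hne
        have hy' : y ∈ fcrStep reverse reach ∧ y ∉ reach := by
          rcases hy with h | h
          · exact h
          · exact absurd (hsubset y h.2) h.1
        have h1 : reach.length = reach.toFinset.card := (List.toFinset_card_of_nodup hnd).symm
        have h2 : (fcrStep reverse reach).length = (fcrStep reverse reach).toFinset.card :=
          (List.toFinset_card_of_nodup hndn).symm
        rw [h1, h2]
        apply Finset.card_lt_card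
        constructor
        · intro a ha; rw [List.mem_toFinset] at ha ⊢; exact hsubset a ha
        · intro hcon
          exact hy'.2 (List.mem_toFinset.mp (hcon (List.mem_toFinset.mpr hy'.1)))
      exact ih (fcrStep reverse reach) hndn hsubn hsoundn (hsubset _ hsid)
        (by omega)

-- characterisation of B's reach set
lemma fcrB_reach_char (species_id : String) (reverse : List (String × List String)) :
    (∀ x, x ∈ fcrLoopB reverse ((species_id :: reverse.flatMap (fun kv => kv.2)).dedup.length) [species_id]
        ↔ FcrReach reverse species_id x) ∧
    (fcrLoopB reverse ((species_id :: reverse.flatMap (fun kv => kv.2)).dedup.length) [species_id]).Nodup := by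
  apply fcrLoopB_spec species_id reverse _ [species_id]
  · exact List.nodup_singleton _
  · intro x hx; rw [List.mem_singleton.mp hx]; exact List.mem_cons_self
  · intro x hx; rw [List.mem_singleton.mp hx]; exact FcrReach.refl
  · exact List.mem_singleton.mpr rfl
  · have : 1 ≤ (species_id :: reverse.flatMap (fun kv => kv.2)).dedup.length := by
      have : species_id ∈ (species_id :: reverse.flatMap (fun kv => kv.2)).dedup :=
        List.mem_dedup.mpr List.mem_cons_self
      exact List.length_pos_of_mem this
    simp only [List.length_singleton]; omega

-- ===== VERDICT (by name: the statement is the Claim_ definition above) =====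
-- assembling the outputs: equal root sets give equal final lists
lemma fcr_assemble (sid : String) (RA LB : List String)
    (hAnd : RA.Nodup) (hLBnd : LB.Nodup) (hiff : ∀ x, x ∈ RA ↔ x ∈ LB) :
    PySem.List.sorted (if RA.isEmpty = true then PySem.Set.add RA sid else RA) (fun x => x) false
      = (if (PySem.List.sorted LB (fun x => x) false).isEmpty = true then [sid]
         else PySem.List.sorted LB (fun x => x) false) := by
  have hperm : RA.Perm LB := (List.perm_ext_iff_of_nodup hAnd hLBnd).mpr hiff
  have hsorted : PySem.List.sorted RA (fun x => x) false = PySem.List.sorted LB (fun x => x) false :=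
    PySem.List.sorted_eq_sorted_of_perm RA LB _ (fun _ _ h => h) hperm
  by_cases hempty : RA.isEmpty = true
  · rw [if_pos hempty]
    have hRAe : RA = [] := List.isEmpty_iff.mp hempty
    have hLBe : LB = [] := by
      rw [List.eq_nil_iff_forall_not_mem]
      intro x hx
      have := (hiff x).mpr hx
      rw [hRAe] at this
      exact List.not_mem_nil this
    rw [if_pos (by rw [hLBe]; rfl), hRAe]
    rfl
  · have hLBne : LB ≠ [] := by
      intro h
      rcases List.exists_mem_of_ne_nil RA (fun h0 => hempty (List.isEmpty_iff.mpr h0)) with ⟨y, hy⟩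
      have := (hiff y).mp hy
      rw [h] at this
      exact List.not_mem_nil this
    have hsne : ¬ (PySem.List.sorted LB (fun x : String => x) false).isEmpty = true := by
      rw [List.isEmpty_iff, PySem.List.sorted_eq_nil_iff]
      exact hLBne
    rw [if_neg hempty, if_neg hsne, hsorted]

-- ===== VERDICT (by name: the statement is the Claim_ definition above) =====
theorem find_chain_roots_spec : Claim_equal_find_chain_roots := by
  intro species_id reverse _
  unfold Spec_find_chain_roots
  obtain ⟨hA, hAnd⟩ := fcrA_roots_char species_id reverse
  obtain ⟨hB, hBnd⟩ := fcrB_reach_char species_id reverse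
  have hLBnd := List.Nodup.filter (fun x => (fcrPar reverse x).isEmpty) hBnd
  have hiff : ∀ x, x ∈ (fcrLoopA reverse (1 + (reverse.map (fun kv => kv.2.length)).sum)
        [species_id] ([] : List String) ([] : List String)).2 ↔
      x ∈ (fcrLoopB reverse ((species_id :: reverse.flatMap (fun kv => kv.2)).dedup.length)
        [species_id]).filter (fun x => (fcrPar reverse x).isEmpty) := by
    intro x
    rw [hA x, List.mem_filter]
    constructor
    · rintro ⟨h1, h2⟩; exact ⟨(hB x).mpr h1, List.isEmpty_iff.mpr h2⟩
    · rintro ⟨h1, h2⟩; exact ⟨(hB x).mp h1, List.isEmpty_iff.mp h2⟩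
  exact fcr_assemble species_id _ _ hAnd hLBnd hiff
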